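-- pv_equiv track=rewrite | github.com/vivekVSH/SAV.com | utils.py | parse_timestamps
-- ===== SOURCE A (Python) =====
-- from collections import defaultdict
--
-- def parse_timestamps(timestamp_str):
--     timestamps = timestamp_str.split(",")
--     timestamp_groups = defaultdict(list)
--     for ts in timestamps:
--         ts = ts.strip()
--         if ts:
--             timestamp_groups[ts].append(ts)
--     return dict(timestamp_groups)  # Fixed: return regular dict for test compatibility
-- ===== SOURCE B (Python) =====
-- def parse_timestamps(timestamp_str):
--     # Stage 1: clean token list (stripped, empties dropped).
--     tokens = [t for t in (p.strip() for p in timestamp_str.split(",")) if t]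
--     # Stage 2: dedupe keys in first-occurrence order, then for each key collect
--     # its occurrences by a fresh scan of the token list (no incremental dict state).
--     return {k: [t for t in tokens if t == k] for k in dict.fromkeys(tokens)}
-- ===== Notes on version B (the rewrite author's own statement) =====
-- stated objective: alternative
-- what changed: B replaces A's single incremental defaultdict-append pass with a staged design: build the clean token list, dedupe keys in first-occurrence order via dict.fromkeys, then materialize each group by an independent filtering scan of the token list per key.
import Mathlib
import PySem

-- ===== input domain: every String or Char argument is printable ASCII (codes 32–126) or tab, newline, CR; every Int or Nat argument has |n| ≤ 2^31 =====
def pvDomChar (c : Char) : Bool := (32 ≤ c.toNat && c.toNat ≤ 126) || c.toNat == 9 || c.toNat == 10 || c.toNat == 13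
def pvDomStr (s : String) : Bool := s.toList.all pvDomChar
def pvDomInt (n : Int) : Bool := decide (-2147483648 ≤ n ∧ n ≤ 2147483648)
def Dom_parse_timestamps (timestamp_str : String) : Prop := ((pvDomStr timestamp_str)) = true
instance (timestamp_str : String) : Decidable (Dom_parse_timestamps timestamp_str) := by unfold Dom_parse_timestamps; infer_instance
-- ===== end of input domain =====

-- B stages the work: clean token list, dedupe keys in first-occurrence order, then one
-- independent filtering scan per key, instead of A's single incremental defaultdict-append pass.

-- ===== PORT A =====
def parse_timestamps (timestamp_str : String) : List (String × List String) :=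
  let timestamps := (PySem.Chars.splitOn timestamp_str.toList ",".toList).map String.ofList
  let timestamp_groups : PySem.Dict String (List String) :=
    timestamps.foldl (fun d ts =>
      let ts := PySem.Str.strip ts
      if ts ≠ "" then d.modify ts [] (fun l => l ++ [ts]) else d)
      PySem.Dict.empty
  timestamp_groups.items

-- ===== PORT B =====
def parse_timestamps_alt (timestamp_str : String) : List (String × List String) :=
  let tokens := (((PySem.Chars.splitOn timestamp_str.toList ",".toList).map String.ofList).map
      PySem.Str.strip).filter (fun t => decide (t ≠ ""))
  -- dict.fromkeys(tokens): keys in first-occurrence order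
  (PySem.Set.ofList tokens).map (fun k => (k, tokens.filter (fun t => t == k)))

-- ===== PRECONDITION & SPEC =====
def Spec_parse_timestamps (timestamp_str : String) (out : List (String × List String)) : Prop := out = parse_timestamps_alt timestamp_str
instance (timestamp_str : String) (out : List (String × List String)) : Decidable (Spec_parse_timestamps timestamp_str out) := by unfold Spec_parse_timestamps; infer_instance

-- ===== CLAIM =====
def Claim_equal_parse_timestamps : Prop := ∀ (timestamp_str : String), Dom_parse_timestamps timestamp_str → Spec_parse_timestamps timestamp_str (parse_timestamps timestamp_str)

-- ===== LEMMAS AND PROOFS =====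

-- A's guarded loop over the raw split pieces equals the plain grouping loop over the
-- stripped, non-empty tokens (B's token list).
theorem foldl_guard_eq_foldl_filter_map (l : List String)
    (d : PySem.Dict String (List String)) :
    l.foldl (fun d ts =>
      let ts := PySem.Str.strip ts
      if ts ≠ "" then d.modify ts [] (fun l => l ++ [ts]) else d) d
    = ((l.map PySem.Str.strip).filter (fun t => decide (t ≠ ""))).foldl
        (fun d t => d.modify t [] (fun l => l ++ [t])) d := by
  induction l generalizing d with
  | nil => rfl
  | cons x xs ih =>
    simp only [List.map_cons, List.filter_cons, List.foldl_cons]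
    by_cases h : PySem.Str.strip x = ""
    · rw [if_neg (by simp [h]), if_neg (by simp [h])]
      exact ih d
    · rw [if_pos h, if_pos (by simp [h]), List.foldl_cons]
      exact ih _

theorem foldl_group_eq_pairs (toks : List String) (d : PySem.Dict String (List String)) :
    toks.foldl (fun d t => d.modify t [] (fun l => l ++ [t])) d
    = (toks.map (fun t => (t, t))).foldl (fun d p => d.modify p.1 [] (fun l => l ++ [p.2])) d := by
  rw [List.foldl_map]

theorem getD_group (toks : List String) (c : String) :
    ((toks.foldl (fun d t => d.modify t [] (fun l => l ++ [t]))
        (PySem.Dict.empty : PySem.Dict String (List String))).getD c [])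
    = toks.filter (fun t => t == c) := by
  rw [foldl_group_eq_pairs, PySem.Dict.getD_foldl_modify_append]
  simp only [PySem.Dict.getD_empty, List.nil_append, List.filter_map, List.map_map,
    Function.comp_def]
  simp

theorem items_group (toks : List String) :
    (toks.foldl (fun d t => d.modify t [] (fun l => l ++ [t]))
        (PySem.Dict.empty : PySem.Dict String (List String))).items
    = (PySem.Set.ofList toks).map (fun k => (k, toks.filter (fun t => t == k))) := by
  have hnd : (toks.foldl (fun d t => d.modify t [] (fun l => l ++ [t]))
      (PySem.Dict.empty : PySem.Dict String (List String))).keys.Nodup := by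
    have := PySem.Dict.nodup_keys_foldl_modify_key toks (fun t => t) ([] : List String)
      (fun _ t => fun l => l ++ [t]) PySem.Dict.empty (by simp)
    simpa using this
  have hkeys : (toks.foldl (fun d t => d.modify t [] (fun l => l ++ [t]))
      (PySem.Dict.empty : PySem.Dict String (List String))).keys = PySem.Set.ofList toks := by
    have := PySem.Dict.keys_foldl_modify (l := toks) (d0 := ([] : List String))
      (f := fun (_ : PySem.Dict String (List String)) t => fun l => l ++ [t])
      (d := PySem.Dict.empty)
    simpa [PySem.Set.update, PySem.Set.ofList] using this
  rw [PySem.Dict.items_eq_map_keys _ hnd [], hkeys]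
  exact List.map_congr_left (fun k _ => by rw [getD_group])

-- ===== VERDICT =====
theorem parse_timestamps_spec : Claim_equal_parse_timestamps := by
  intro s _
  unfold Spec_parse_timestamps parse_timestamps parse_timestamps_alt
  simp only [foldl_guard_eq_foldl_filter_map, items_group]
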